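-- pv_equiv track=rewrite | github.com/Sesquii/pipeline_test | Script_Factory/Script_Factory_Runs/all_runs/BATCH9/devstral-small-2507/BATCH8_PROMPT10_devstral-small-2507.py | exaggerated_word_counter
-- ===== SOURCE A (Python) =====
-- def exaggerated_word_counter(input_string):
--     """
--     Counts occurrences of each word in a string.
--     Words with exactly 3 characters have their counts exaggerated by a factor of 10.
--
--     Args:
--         input_string (str): The input string to analyze
--
--     Returns:
--         dict: A dictionary containing words as keys and their exaggerated counts as values
--     """
--     # Split the input string into individual words
--     words = input_string.split()
--
--     # Initialize an empty dictionary to store word counts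
--     word_counts = {}
--
--     for word in words:
--         # Clean up any punctuation by stripping it from both ends of the word
--         cleaned_word = word.strip(".,!?;:")
--
--         if len(cleaned_word) == 3:
--             # For 3-character words, count each occurrence as 10 times actual
--             count = word_counts.get(cleaned_word, 0) + 10
--         else:
--             # For other words, use the normal count
--             count = word_counts.get(cleaned_word, 0) + 1
--
--         word_counts[cleaned_word] = count
--
--     return word_counts
-- ===== SOURCE B (Python) =====
-- def exaggerated_word_counter(input_string):
--     # Clean every word once.
--     cleaned = [w.strip(".,!?;:") for w in input_string.split()]
--     # Distinct words in first-occurrence order (no counting dict at all).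
--     distinct = []
--     for w in cleaned:
--         if w not in distinct:
--             distinct.append(w)
--     # Count each distinct word over the whole list, exaggerating 3-char words.
--     return {w: cleaned.count(w) * (10 if len(w) == 3 else 1) for w in distinct}
-- ===== Notes on version B (the rewrite author's own statement) =====
-- stated objective: alternative
-- what changed: B keeps no running tally at all: it collects the distinct cleaned words in first-occurrence order and then computes each one's total with a whole-list cleaned.count(w) scan (dedup-then-count, O(n*k) nested scans), instead of A's single pass that tallies weighted increments into a dict.
import Mathlib
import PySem

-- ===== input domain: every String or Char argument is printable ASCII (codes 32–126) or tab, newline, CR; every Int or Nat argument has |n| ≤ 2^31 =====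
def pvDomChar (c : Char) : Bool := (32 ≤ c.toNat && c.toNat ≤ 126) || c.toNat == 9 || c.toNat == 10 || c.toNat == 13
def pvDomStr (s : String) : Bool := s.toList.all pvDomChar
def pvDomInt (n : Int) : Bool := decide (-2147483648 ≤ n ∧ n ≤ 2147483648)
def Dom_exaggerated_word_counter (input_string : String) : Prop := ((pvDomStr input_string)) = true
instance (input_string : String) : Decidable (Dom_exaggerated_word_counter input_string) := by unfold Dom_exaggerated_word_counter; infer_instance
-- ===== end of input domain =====

-- B replaces A's running weighted tally with dedup-then-count: distinct cleaned words first,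
-- then a whole-list count per distinct word (objective: alternative; not faster).

-- ===== PORT A =====
-- one loop: clean each word, add 10 or 1 depending on the cleaned word's length
def exaggerated_word_counter (input_string : String) : List (String × Int) :=
  let words := PySem.Str.split₀ input_string
  (words.foldl (fun word_counts word =>
      let cleaned_word := PySem.Str.stripChars word ".,!?;:"
      let count : Int :=
        if PySem.Str.len cleaned_word = 3 then word_counts.getD cleaned_word 0 + 10
        else word_counts.getD cleaned_word 0 + 1
      word_counts.insert cleaned_word count)
    (PySem.Dict.empty : PySem.Dict String Int)).items

-- ===== PORT B =====
-- pass 1: clean; pass 2: distinct words in first-occurrence order ('if w not in distinct: append'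
-- = PySem.Set.add); pass 3: whole-list count per distinct word, ×10 for 3-char words
def exaggerated_word_counter_alt (input_string : String) : List (String × Int) :=
  let cleaned := (PySem.Str.split₀ input_string).map (fun w => PySem.Str.stripChars w ".,!?;:")
  let distinct := cleaned.foldl PySem.Set.add (PySem.Set.empty : PySem.Set String)
  distinct.map (fun w => (w, (cleaned.count w : Int) * (if PySem.Str.len w = 3 then 10 else 1)))

-- ===== PRECONDITION & SPEC =====
def Spec_exaggerated_word_counter (input_string : String) (out : List (String × Int)) : Prop := out = exaggerated_word_counter_alt input_string
instance (input_string : String) (out : List (String × Int)) : Decidable (Spec_exaggerated_word_counter input_string out) := by unfold Spec_exaggerated_word_counter; infer_instance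

-- ===== CLAIM (what is proved, stated in full; the proofs are below) =====
def Claim_equal_exaggerated_word_counter : Prop := ∀ (input_string : String), Dom_exaggerated_word_counter input_string → Spec_exaggerated_word_counter input_string (exaggerated_word_counter input_string)

-- ===== LEMMAS AND PROOFS =====

-- per-occurrence increment of A, as a function of the cleaned word only
def pvInc (w : String) : Int := if PySem.Str.len w = 3 then 10 else 1

-- the weighted-increment fold's lookup: starting value plus (count · increment)
theorem pvGetD_weighted (l : List String) (d : PySem.Dict String Int) (v : String) :
    (l.foldl (fun d w => d.insert w (d.getD w 0 + pvInc w)) d).getD v 0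
      = d.getD v 0 + (l.count v : Int) * pvInc v := by
  induction l generalizing d with
  | nil => simp
  | cons x l ih =>
    simp only [List.foldl_cons, ih, List.count_cons, PySem.Dict.getD_insert]
    by_cases h : v = x
    · subst h; simp; ring
    · have h' : ¬x = v := fun hx => h hx.symm
      simp [h, h']

-- A's items: distinct cleaned words (first occurrence) with count·increment
theorem pvWeighted_items (l : List String) :
    (l.foldl (fun d w => d.insert w (d.getD w 0 + pvInc w))
        (PySem.Dict.empty : PySem.Dict String Int)).items
      = (PySem.Set.ofList l).map (fun k => (k, (l.count k : Int) * pvInc k)) := by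
  have hnd : (l.foldl (fun d w => d.insert w (d.getD w 0 + pvInc w))
      (PySem.Dict.empty : PySem.Dict String Int)).keys.Nodup :=
    PySem.Dict.nodup_keys_foldl_insert l _ _ PySem.Dict.nodup_keys_empty
  rw [PySem.Dict.items_eq_map_keys _ hnd 0, PySem.Dict.keys_foldl_insert]
  simp only [PySem.Dict.keys_empty, PySem.Set.update_nil_left]
  exact List.map_congr_left (fun k _ => by rw [pvGetD_weighted]; simp)

-- ===== VERDICT (by name: the statement is the Claim_ definition above) =====
theorem exaggerated_word_counter_spec : Claim_equal_exaggerated_word_counter := by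
  intro s _
  unfold Spec_exaggerated_word_counter exaggerated_word_counter exaggerated_word_counter_alt
  dsimp only
  rw [← List.foldl_map (f := fun w => PySem.Str.stripChars w ".,!?;:")
      (g := fun (d : PySem.Dict String Int) w =>
        d.insert w (if PySem.Str.len w = 3 then d.getD w 0 + 10 else d.getD w 0 + 1))]
  have hA : (fun (d : PySem.Dict String Int) (w : String) =>
      d.insert w (if PySem.Str.len w = 3 then d.getD w 0 + 10 else d.getD w 0 + 1))
      = fun d w => d.insert w (d.getD w 0 + pvInc w) := by
    funext d w; unfold pvInc; split_ifs <;> rfl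
  rw [hA, pvWeighted_items]
  simp only [PySem.Set.empty] at *
  rw [← PySem.Set.ofList_eq_foldl]
  exact List.map_congr_left (fun k _ => by unfold pvInc; rfl)
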